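-- pv_equiv track=rewrite | github.com/katriken/BIP | scripts/select_supp_prot.py | leave_prot_2pept1tissue
-- ===== SOURCE A (Python) =====
-- def leave_prot_2pept1tissue(proteins, peptides, t_info):
--     '''
--     Input:
--     - proteins: list of protein ids of a gene,
--     - peptides: 2D list with gene-specific peptides found in corresponding
--         proteins,
--     - t_info: dictionary with peptide sequences and tissues where the peptides
--           were identified.
--     Output: new lists of proteins and peptides for proteins with >= 2
--     gene-specific peptides from 1 tissue.
--     '''
--     new_prot = []
--     new_pept = []
--     for i in range(len(proteins)):
--         pept = peptides[i]
--         t = [t_info[x] for x in pept]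
--         t = [x.split(',') for x in t]
--         t = [y for x in t for y in x]
--         if len(set(t)) < len(t):
--             new_prot.append(proteins[i])
--             new_pept.append(peptides[i])
--     return new_prot, new_pept
-- ===== SOURCE B (Python) =====
-- def leave_prot_2pept1tissue(proteins, peptides, t_info):
--     kept = []
--     for prot, pept in zip(proteins, peptides):
--         ts = sorted(t for x in pept for t in t_info[x].split(','))
--         if any(a == b for a, b in zip(ts, ts[1:])):
--             kept.append((prot, pept))
--     return [p for p, _ in kept], [q for _, q in kept]
-- ===== Notes on version B (the rewrite author's own statement) =====
-- stated objective: alternative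
-- what changed: Duplicate-tissue detection is done by sorting the flattened tissue list and comparing adjacent entries instead of hashing into a set and comparing lengths; the loop runs over zip(proteins, peptides) accumulating kept (protein, peptide) pairs that are unzipped at the end, instead of index-based iteration with two parallel appends.
import Mathlib
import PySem

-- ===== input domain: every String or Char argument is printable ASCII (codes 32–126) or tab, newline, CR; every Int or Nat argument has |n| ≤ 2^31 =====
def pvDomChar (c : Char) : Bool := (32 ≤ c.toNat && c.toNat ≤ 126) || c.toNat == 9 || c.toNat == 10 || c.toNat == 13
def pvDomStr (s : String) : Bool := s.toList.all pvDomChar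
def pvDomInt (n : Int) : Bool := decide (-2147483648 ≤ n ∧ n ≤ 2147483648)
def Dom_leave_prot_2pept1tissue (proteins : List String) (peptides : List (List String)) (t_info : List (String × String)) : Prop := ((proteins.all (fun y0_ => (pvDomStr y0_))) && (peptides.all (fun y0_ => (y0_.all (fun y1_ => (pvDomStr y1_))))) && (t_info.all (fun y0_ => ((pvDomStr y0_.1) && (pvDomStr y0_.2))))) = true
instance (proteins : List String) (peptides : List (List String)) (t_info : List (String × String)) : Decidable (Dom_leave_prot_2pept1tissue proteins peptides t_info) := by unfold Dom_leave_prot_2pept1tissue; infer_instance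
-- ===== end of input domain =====

-- B detects a repeated tissue by sorting the flattened tissue list and comparing
-- neighbours (instead of A's set-size test), looping over zip(proteins, peptides)
-- and unzipping the kept pairs at the end; same return value on Pre_.

-- s.split(',') with the literal nonempty separator ',' (split? is some for a nonempty separator)
def splitComma (s : String) : List String := (PySem.Str.split? s ",").getD []

-- ===== PORT A =====
-- for i in range(len(proteins)): pept = peptides[i]; flatten tissues; set-size test; two appends
def leave_prot_2pept1tissue (proteins : List String) (peptides : List (List String)) (t_info : List (String × String)) : List String × List (List String) :=
  let d := PySem.Dict.mk t_info
  (PySem.List.pyRange 0 (proteins.length : Int) 1).foldl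
    (fun (acc : List String × List (List String)) i =>
      let pept := PySem.List.pyGetD peptides i []
      let t1 := pept.map (fun x => d.getD x "")
      let t2 := t1.map (fun x => splitComma x)
      let t := t2.flatMap (fun x => x)
      if (PySem.Set.ofList t).length < t.length then
        (acc.1 ++ [PySem.List.pyGetD proteins i ""], acc.2 ++ [PySem.List.pyGetD peptides i []])
      else acc)
    ([], [])

-- ===== PORT B =====
-- for prot, pept in zip(...): ts = sorted(flattened tissues); any adjacent equal; kept pairs, unzipped
def leave_prot_2pept1tissue_alt (proteins : List String) (peptides : List (List String)) (t_info : List (String × String)) : List String × List (List String) :=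
  let d := PySem.Dict.mk t_info
  let kept := (proteins.zip peptides).foldl
    (fun (acc : List (String × List String)) pp =>
      let ts := PySem.List.sorted (pp.2.flatMap (fun x => splitComma (d.getD x ""))) (fun t => t) false
      if (ts.zip ts.tail).any (fun ab => ab.1 == ab.2) then acc ++ [pp] else acc)
    []
  (kept.map (fun pp => pp.1), kept.map (fun pp => pp.2))

-- ===== PRECONDITION & SPEC =====
-- Pre_ excludes exactly the inputs where the Python A raises: an IndexError when
-- proteins is longer than peptides, and a KeyError when some looked-up peptide is
-- not a key of t_info.
def Pre_leave_prot_2pept1tissue (proteins : List String) (peptides : List (List String)) (t_info : List (String × String)) : Prop :=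
  proteins.length ≤ peptides.length ∧
  ∀ p ∈ peptides.take proteins.length, ∀ x ∈ p, (t_info.map (fun kv => kv.1)).contains x
instance (proteins : List String) (peptides : List (List String)) (t_info : List (String × String)) : Decidable (Pre_leave_prot_2pept1tissue proteins peptides t_info) := by unfold Pre_leave_prot_2pept1tissue; infer_instance

def pvWitness_leave_prot_2pept1tissue : List String × List (List String) × (List (String × String)) :=
  (["P1", "P2"], [["pepA", "pepB"], ["pepA"]], [("pepA", "liver,brain"), ("pepB", "liver")])

def Spec_leave_prot_2pept1tissue (proteins : List String) (peptides : List (List String)) (t_info : List (String × String)) (out : List String × List (List String)) : Prop := out = leave_prot_2pept1tissue_alt proteins peptides t_info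
instance (proteins : List String) (peptides : List (List String)) (t_info : List (String × String)) (out : List String × List (List String)) : Decidable (Spec_leave_prot_2pept1tissue proteins peptides t_info out) := by unfold Spec_leave_prot_2pept1tissue; infer_instance

-- ===== CLAIM (what is proved, stated in full; the proofs are below) =====
def Claim_equal_leave_prot_2pept1tissue : Prop := ∀ (proteins : List String) (peptides : List (List String)) (t_info : List (String × String)), Dom_leave_prot_2pept1tissue proteins peptides t_info → Pre_leave_prot_2pept1tissue proteins peptides t_info → Spec_leave_prot_2pept1tissue proteins peptides t_info (leave_prot_2pept1tissue proteins peptides t_info)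


-- ===== LEMMAS AND PROOFS =====

-- duplicate test, A's side: |set(t)| < |t|  ↔  ¬ t.Nodup
theorem setSize_lt_iff_not_nodup (t : List String) :
    (PySem.Set.ofList t).length < t.length ↔ ¬ t.Nodup := by
  constructor
  · intro hlt hnd
    rw [PySem.Set.ofList_eq_self_of_nodup t hnd] at hlt
    omega
  · intro hnd
    have hfin : (PySem.Set.ofList t).toFinset = t.toFinset := by
      ext x
      simp [PySem.Set.mem_ofList t]
    have h1 : (PySem.Set.ofList t).length = t.toFinset.card := by
      rw [← hfin, List.toFinset_card_of_nodup (PySem.Set.nodup_ofList t)]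
    have h2 : t.toFinset.card = t.dedup.length := List.card_toFinset t
    have h3 : t.dedup.length < t.length := by
      refine Nat.lt_of_le_of_ne t.dedup_sublist.length_le ?_
      intro hlen
      exact hnd (List.dedup_eq_self.mp (t.dedup_sublist.eq_of_length hlen))
    omega

-- duplicate test, B's side: a ≤-sorted list has an adjacent equal pair iff it is not Nodup
theorem adj_eq_iff_not_nodup (ts : List String) (h : ts.Pairwise (· ≤ ·)) :
    (ts.zip ts.tail).any (fun ab => ab.1 == ab.2) = true ↔ ¬ ts.Nodup := by
  induction ts with
  | nil => simp
  | cons a l ih =>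
    cases l with
    | nil => simp
    | cons b m =>
      have hab : a ≤ b := (List.pairwise_cons.mp h).1 b (by simp)
      have htail := (List.pairwise_cons.mp h).2
      have ihm := ih htail
      simp only [List.tail_cons, List.zip_cons_cons, List.any_cons, Bool.or_eq_true,
        beq_iff_eq] at ihm ⊢
      constructor
      · rintro (rfl | hrest)
        · simp
        · intro hnd
          exact (ihm.mp hrest) hnd.of_cons
      · intro hnd
        by_cases hab2 : a = b
        · exact Or.inl hab2
        · refine Or.inr (ihm.mpr ?_)
          intro hnodtail
          apply hnd
          refine List.nodup_cons.mpr ⟨?_, hnodtail⟩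
          intro hmem
          rcases List.mem_cons.mp hmem with rfl | hmem'
          · exact hab2 rfl
          · exact hab2 (le_antisymm hab ((List.pairwise_cons.mp htail).1 a hmem'))

-- the two Bool conditions agree on every peptide row
theorem cond_eq (d : PySem.Dict String String) (pept : List String) :
    (decide ((PySem.Set.ofList (((pept.map (fun x => d.getD x "")).map (fun x => splitComma x)).flatMap (fun x => x))).length < (((pept.map (fun x => d.getD x "")).map (fun x => splitComma x)).flatMap (fun x => x)).length))
    = (((PySem.List.sorted (pept.flatMap (fun x => splitComma (d.getD x ""))) (fun t => t) false).zip (PySem.List.sorted (pept.flatMap (fun x => splitComma (d.getD x ""))) (fun t => t) false).tail).any (fun ab => ab.1 == ab.2)) := by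
  have hflat : ((pept.map (fun x => d.getD x "")).map (fun x => splitComma x)).flatMap (fun x => x)
      = pept.flatMap (fun x => splitComma (d.getD x "")) := by
    simp [List.flatMap_map, Function.comp_def]
  simp only [hflat]
  refine Bool.eq_iff_iff.mpr ?_
  simp only [decide_eq_true_eq]
  have h2 := adj_eq_iff_not_nodup
    (PySem.List.sorted (pept.flatMap (fun x => splitComma (d.getD x ""))) (fun t => t) false)
    (PySem.List.sorted_pairwise _ _)
  have h3 : (PySem.List.sorted (pept.flatMap (fun x => splitComma (d.getD x ""))) (fun t => t) false).Nodup
      ↔ (pept.flatMap (fun x => splitComma (d.getD x ""))).Nodup :=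
    (PySem.List.sorted_perm _ _ _).nodup_iff
  exact (setSize_lt_iff_not_nodup _).trans ((h2.trans (not_congr h3)).symm)

-- A's accumulator loop as filter + map
theorem foldA_eq {α β γ : Type} (c : α → Prop) [DecidablePred c] (f : α → β) (g : α → γ) :
    ∀ (l : List α) (acc : List β × List γ),
      l.foldl (fun acc k => if c k then (acc.1 ++ [f k], acc.2 ++ [g k]) else acc) acc
        = (acc.1 ++ (l.filter (fun k => decide (c k))).map f, acc.2 ++ (l.filter (fun k => decide (c k))).map g) := by
  intro l
  induction l with
  | nil => simp
  | cons x xs ih =>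
    intro acc
    simp only [List.foldl_cons, List.filter_cons]
    by_cases h : c x <;> simp [h, ih, List.append_assoc]

-- B's accumulator loop as filter
theorem foldB_eq {α : Type} (c : α → Bool) :
    ∀ (l : List α) (acc : List α),
      l.foldl (fun acc pp => if c pp then acc ++ [pp] else acc) acc = acc ++ l.filter c := by
  intro l
  induction l with
  | nil => simp
  | cons x xs ih =>
    intro acc
    simp only [List.foldl_cons, List.filter_cons]
    by_cases h : c x <;> simp [h, ih, List.append_assoc]

-- index-based filter/map over range = pair-based filter/map over zip
theorem idx_filter_map {β : Type} (c : List String → Bool) (F : String → List String → β) :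
    ∀ (ps : List String) (qs : List (List String)), ps.length ≤ qs.length →
      ((List.range ps.length).filter (fun k => c (qs.getD k []))).map (fun k => F (ps.getD k "") (qs.getD k []))
        = ((ps.zip qs).filter (fun pp => c pp.2)).map (fun pp => F pp.1 pp.2) := by
  intro ps
  induction ps with
  | nil => simp
  | cons p ps ih =>
    intro qs hlen
    cases qs with
    | nil => simp at hlen
    | cons q qs =>
      simp only [List.length_cons, List.range_succ_eq_map, List.filter_cons,
        List.getD_cons_zero, List.filter_map, List.map_map]
      by_cases h : c q <;>
        simpa [h, Function.comp_def, List.getD] using ih qs (by simpa using hlen)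

-- ===== VERDICT (by name: the statement is the Claim_ definition above) =====
theorem leave_prot_2pept1tissue_spec : Claim_equal_leave_prot_2pept1tissue := by
  intro ps qs ti hdom hpre
  unfold Spec_leave_prot_2pept1tissue leave_prot_2pept1tissue leave_prot_2pept1tissue_alt
  simp only [PySem.List.pyRange_one, zero_add, Int.sub_zero, Int.toNat_natCast,
    List.foldl_map, PySem.List.pyGetD_natCast]
  rw [foldA_eq, foldB_eq]
  simp only [List.nil_append]
  have hcond : (fun k => decide ((PySem.Set.ofList
        (((((qs.getD k []).map (fun x => (PySem.Dict.mk ti).getD x "")).map (fun x => splitComma x)).flatMap (fun x => x)))).length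
        < (((((qs.getD k []).map (fun x => (PySem.Dict.mk ti).getD x "")).map (fun x => splitComma x)).flatMap (fun x => x))).length))
      = (fun k => (((PySem.List.sorted ((qs.getD k []).flatMap (fun x => splitComma ((PySem.Dict.mk ti).getD x ""))) (fun t => t) false).zip
          (PySem.List.sorted ((qs.getD k []).flatMap (fun x => splitComma ((PySem.Dict.mk ti).getD x ""))) (fun t => t) false).tail).any
          (fun ab => ab.1 == ab.2))) :=
    funext fun k => cond_eq (PySem.Dict.mk ti) (qs.getD k [])
  rw [hcond]
  refine Prod.ext ?_ ?_ <;> dsimp only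
  · exact idx_filter_map (fun pept => (((PySem.List.sorted (pept.flatMap (fun x => splitComma ((PySem.Dict.mk ti).getD x ""))) (fun t => t) false).zip (PySem.List.sorted (pept.flatMap (fun x => splitComma ((PySem.Dict.mk ti).getD x ""))) (fun t => t) false).tail).any (fun ab => ab.1 == ab.2))) (fun p q => p) ps qs hpre.1
  · exact idx_filter_map (fun pept => (((PySem.List.sorted (pept.flatMap (fun x => splitComma ((PySem.Dict.mk ti).getD x ""))) (fun t => t) false).zip (PySem.List.sorted (pept.flatMap (fun x => splitComma ((PySem.Dict.mk ti).getD x ""))) (fun t => t) false).tail).any (fun ab => ab.1 == ab.2))) (fun p q => q) ps qs hpre.1
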